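-- pv_equiv track=rewrite | github.com/aphymi/advent-of-code | y2022/day17.py | rock_can_occupy
-- ===== SOURCE A (Python) =====
-- RockMap = list[list[str]]
--
-- Rock = list[list[str]]
--
-- Coords = tuple[int, int]
--
-- def rock_can_occupy(
-- 	rock_map: RockMap,
-- 	rock: Rock,
-- 	rock_coords: Coords,
-- ) -> bool:
-- 	x, y = rock_coords
-- 	rock_height = len(rock)
-- 	rock_width = len(rock[0])
--
-- 	map_width = len(rock_map[0])
--
-- 	if x < 0:
-- 		return False
--
-- 	if y - (rock_height - 1) < 0:
-- 		return False
--
-- 	if x + (rock_width - 1) > (map_width - 1):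
-- 		return False
--
-- 	map_area_to_occupy = [
-- 		rock_line[x:x+rock_width]
-- 		for rock_line in reversed(rock_map[y-rock_height+1:y+1])
-- 	]
--
-- 	return all(
-- 		all(
-- 			not (rock_char == "#" and map_char == "#")
-- 			for rock_char, map_char in zip(rock_row, map_row)
-- 		)
-- 		for rock_row, map_row in zip(rock, map_area_to_occupy)
-- 	)
-- ===== SOURCE B (Python) =====
-- def rock_can_occupy(rock_map, rock, rock_coords):
--     x, y = rock_coords
--     rock_height = len(rock)
--     rock_width = len(rock[0])
--     map_width = len(rock_map[0])
--     if x < 0: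
--         return False
--     if y - (rock_height - 1) < 0:
--         return False
--     if x + (rock_width - 1) > map_width - 1:
--         return False
--     # coordinate sets: every '#' cell of the chamber, and every '#' cell of the
--     # rock (within its declared width) translated to absolute coordinates
--     occupied = {
--         (c, r)
--         for r, map_row in enumerate(rock_map)
--         for c, ch in enumerate(map_row)
--         if ch == "#"
--     }
--     rock_cells = {
--         (x + j, y - i)
--         for i, rock_row in enumerate(rock)
--         for j, ch in enumerate(rock_row[:rock_width])
--         if ch == "#"
--     }
--     return occupied.isdisjoint(rock_cells)
-- ===== Notes on version B (the rewrite author's own statement) =====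
-- stated objective: alternative
-- what changed: B keeps the three bounds guards but replaces A's window extraction (reversed map slice, per-row slices, nested zips) with a set-based collision test: it builds the set of absolute coordinates of all '#' cells of the chamber and the set of absolute coordinates of the rock's '#' cells, and answers with set disjointness, never indexing into the map window.
-- outside the precondition, e.g. on rock_can_occupy([['#']], [['.'], ['#']], (0, 1)): A returns True, B returns False; on rock_can_occupy([['.']], [['#'], ['#']], (0, 2)): A returns True, B returns True
import Mathlib
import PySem

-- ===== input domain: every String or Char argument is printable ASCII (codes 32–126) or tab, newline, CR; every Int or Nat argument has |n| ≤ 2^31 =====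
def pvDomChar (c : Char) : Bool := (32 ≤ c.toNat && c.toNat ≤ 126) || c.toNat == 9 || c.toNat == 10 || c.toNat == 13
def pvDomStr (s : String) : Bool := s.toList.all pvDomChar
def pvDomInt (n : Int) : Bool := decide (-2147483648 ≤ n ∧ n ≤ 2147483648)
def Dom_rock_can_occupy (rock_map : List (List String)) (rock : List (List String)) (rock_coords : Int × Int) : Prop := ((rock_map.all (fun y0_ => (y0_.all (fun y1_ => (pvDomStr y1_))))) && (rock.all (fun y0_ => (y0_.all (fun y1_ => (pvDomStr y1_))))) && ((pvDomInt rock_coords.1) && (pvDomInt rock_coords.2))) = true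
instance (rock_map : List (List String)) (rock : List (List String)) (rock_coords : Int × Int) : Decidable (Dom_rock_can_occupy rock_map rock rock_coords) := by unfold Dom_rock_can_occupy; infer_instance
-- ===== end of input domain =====

-- B keeps the three bounds guards but replaces A's window extraction (reversed map slice, per-row
-- slices, nested zips) with a set-based collision test: the '#' cells of the whole chamber and the
-- '#' cells of the rock are turned into two sets of absolute coordinates once, and the answer is
-- their disjointness (alternative decomposition; no indexing into the map window at all).

-- ===== PORT A =====
def rock_can_occupy (rock_map : List (List String)) (rock : List (List String)) (rock_coords : Int × Int) : Bool :=
  let x := rock_coords.1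
  let y := rock_coords.2
  let rock_height : Int := rock.length
  -- rock[0] / rock_map[0] raise IndexError on an empty list in Python; Pre_ excludes those inputs,
  -- so the getD defaults below are never read
  let rock_width : Int := ((PySem.List.pyGetD rock 0 []).length : Int)
  let map_width : Int := ((PySem.List.pyGetD rock_map 0 []).length : Int)
  if x < 0 then false
  else if y - (rock_height - 1) < 0 then false
  else if x + (rock_width - 1) > map_width - 1 then false
  else
    let map_area_to_occupy : List (List String) :=
      (PySem.List.slice rock_map (some (y - rock_height + 1)) (some (y + 1))).reverse.map
        (fun rock_line => PySem.List.slice rock_line (some x) (some (x + rock_width)))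
    (rock.zip map_area_to_occupy).all (fun rm =>
      (rm.1.zip rm.2).all (fun cc => !(cc.1 == "#" && cc.2 == "#")))

-- ===== PORT B =====
def rock_can_occupy_alt (rock_map : List (List String)) (rock : List (List String)) (rock_coords : Int × Int) : Bool :=
  let x := rock_coords.1
  let y := rock_coords.2
  let rock_height : Int := rock.length
  -- rock[0] / rock_map[0] raise IndexError on an empty list in Python; Pre_ excludes those inputs
  let rock_width : Int := ((PySem.List.pyGetD rock 0 []).length : Int)
  let map_width : Int := ((PySem.List.pyGetD rock_map 0 []).length : Int)
  if x < 0 then false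
  else if y - (rock_height - 1) < 0 then false
  else if x + (rock_width - 1) > map_width - 1 then false
  else
    -- occupied = {(c, r) for r, map_row in enumerate(rock_map) for c, ch in enumerate(map_row) if ch == "#"}
    let occupied : PySem.Set (Int × Int) :=
      PySem.Set.ofList ((PySem.List.enumerate rock_map 0).flatMap (fun rrow =>
        (PySem.List.enumerate rrow.2 0).filterMap (fun cch =>
          if cch.2 == "#" then some (cch.1, rrow.1) else none)))
    -- rock_cells = {(x + j, y - i) for i, rock_row in enumerate(rock) for j, ch in enumerate(rock_row[:rock_width]) if ch == "#"}
    let rock_cells : PySem.Set (Int × Int) :=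
      PySem.Set.ofList ((PySem.List.enumerate rock 0).flatMap (fun irow =>
        (PySem.List.enumerate (PySem.List.slice irow.2 none (some rock_width)) 0).filterMap (fun jch =>
          if jch.2 == "#" then some (x + jch.1, y - irow.1) else none)))
    PySem.Set.isdisjoint occupied rock_cells

-- ===== PRECONDITION & SPEC =====
-- Pre_ excludes the inputs on which A raises IndexError (empty rock or empty rock_map), and the
-- defensible corner where the three guards pass but the rock window reaches above the stored map
-- (y ≥ len(rock_map)): there A's shortened slice silently re-aligns rock rows against the wrong
-- chamber rows, an artefact of its reversed-slice construction.
def Pre_rock_can_occupy (rock_map : List (List String)) (rock : List (List String)) (rock_coords : Int × Int) : Prop :=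
  rock ≠ [] ∧ rock_map ≠ [] ∧
  ((0 ≤ rock_coords.1 ∧ (rock.length : Int) - 1 ≤ rock_coords.2 ∧
      rock_coords.1 + ((rock.headD []).length : Int) ≤ ((rock_map.headD []).length : Int)) →
    rock_coords.2 < (rock_map.length : Int))
instance (rock_map : List (List String)) (rock : List (List String)) (rock_coords : Int × Int) : Decidable (Pre_rock_can_occupy rock_map rock rock_coords) := by unfold Pre_rock_can_occupy; infer_instance

def pvWitness_rock_can_occupy : List (List String) × List (List String) × (Int × Int) :=
  ([["."], ["."]], [["#"]], (0, 1))

def Spec_rock_can_occupy (rock_map : List (List String)) (rock : List (List String)) (rock_coords : Int × Int) (out : Bool) : Prop := out = rock_can_occupy_alt rock_map rock rock_coords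
instance (rock_map : List (List String)) (rock : List (List String)) (rock_coords : Int × Int) (out : Bool) : Decidable (Spec_rock_can_occupy rock_map rock rock_coords out) := by unfold Spec_rock_can_occupy; infer_instance

-- ===== CLAIM (what is proved, stated in full; the proofs are below) =====
def Claim_equal_rock_can_occupy : Prop := ∀ (rock_map : List (List String)) (rock : List (List String)) (rock_coords : Int × Int), Dom_rock_can_occupy rock_map rock rock_coords → Pre_rock_can_occupy rock_map rock rock_coords → Spec_rock_can_occupy rock_map rock rock_coords (rock_can_occupy rock_map rock rock_coords)

-- ===== LEMMAS AND PROOFS =====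

-- the common index-wise reading both ports are reduced to: no rock '#' cell (within the rock's
-- declared width w) sits on a chamber '#' cell; out-of-range chamber reads give "" and are free
def AgreeProp (rock_map : List (List String)) (rock : List (List String)) (x y : Int) (w : Nat) : Prop :=
  ∀ i : Nat, i < rock.length → ∀ j : Nat, j < min (rock.getD i []).length w →
    ¬((rock.getD i []).getD j "" = "#" ∧ (rock_map.getD (y.toNat - i) []).getD (x.toNat + j) "" = "#")

lemma zipAllIff {α β : Type} (p : α × β → Bool) (d1 : α) (d2 : β) :
    ∀ (l1 : List α) (l2 : List β),
      ((l1.zip l2).all p = true) ↔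
        ∀ i : Nat, i < min l1.length l2.length → p (l1.getD i d1, l2.getD i d2) = true
  | [], l2 => by simp
  | a :: l1, [] => by simp
  | a :: l1, b :: l2 => by
      simp only [List.zip_cons_cons, List.all_cons, Bool.and_eq_true, zipAllIff p d1 d2 l1 l2]
      constructor
      · rintro ⟨h0, h⟩ i hi
        cases i with
        | zero => simpa using h0
        | succ n => simpa using h n (by simp at hi ⊢; omega)
      · intro h
        exact ⟨by simpa using h 0 (by simp),
          fun i hi => by simpa using h (i + 1) (by simp at hi ⊢; omega)⟩

lemma getD_take_drop {α : Type} (l : List α) (a t j : Nat) (d : α) (hj : j < t) :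
    ((l.drop a).take t).getD j d = l.getD (a + j) d := by
  simp [List.getD_eq_getElem?_getD, List.getElem?_take_of_lt hj, List.getElem?_drop]

lemma getD_of_len_le {α : Type} (l : List α) (k : Nat) (d : α) (h : l.length ≤ k) :
    l.getD k d = d := by
  rw [List.getD_eq_getElem?_getD, List.getElem?_eq_none h, Option.getD_none]

lemma getD_rev_map_window (rock_map : List (List String)) (f : List String → List String)
    (s hn i : Nat) (hi : i < hn) (hlen : s + hn ≤ rock_map.length) :
    (((rock_map.drop s).take hn).reverse.map f).getD i [] =
      f (rock_map.getD (s + (hn - 1 - i)) []) := by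
  have hwl : ((rock_map.drop s).take hn).length = hn := by
    simp only [List.length_take, List.length_drop]; omega
  rw [List.getD_eq_getElem?_getD, List.getElem?_map,
    List.getElem?_reverse (by rw [hwl]; omega), hwl,
    List.getElem?_take_of_lt (show hn - 1 - i < hn by omega), List.getElem?_drop,
    List.getElem?_eq_getElem (show s + (hn - 1 - i) < rock_map.length by omega)]
  simp only [Option.map_some, Option.getD_some]
  congr 1
  rw [List.getD_eq_getElem?_getD,
    List.getElem?_eq_getElem (show s + (hn - 1 - i) < rock_map.length by omega), Option.getD_some]

lemma A_side (rock_map rock : List (List String)) (x y : Int) (w : Nat)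
    (hx : 0 ≤ x) (hh : (rock.length : Int) - 1 ≤ y) (hyL : y < (rock_map.length : Int)) :
    ((rock.zip ((PySem.List.slice rock_map (some (y - rock.length + 1)) (some (y + 1))).reverse.map
        (fun rock_line => PySem.List.slice rock_line (some x) (some (x + (w : Int)))))).all
      (fun rm => (rm.1.zip rm.2).all (fun cc => !(cc.1 == "#" && cc.2 == "#"))) = true)
    ↔ AgreeProp rock_map rock x y w := by
  have hslice : PySem.List.slice rock_map (some (y - rock.length + 1)) (some (y + 1)) =
      (rock_map.drop (y + 1 - (rock.length : Int)).toNat).take rock.length := by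
    rw [show y - (rock.length : Int) + 1 = y + 1 - rock.length from by ring,
      PySem.List.slice_toNat _ (by omega) (by omega),
      show (y + 1).toNat - (y + 1 - (rock.length : Int)).toNat = rock.length from by omega]
  have hlen : (y + 1 - (rock.length : Int)).toNat + rock.length ≤ rock_map.length := by omega
  have hwl : (((rock_map.drop (y + 1 - (rock.length : Int)).toNat).take rock.length).reverse.map
      (fun rock_line => PySem.List.slice rock_line (some x) (some (x + (w : Int))))).length
      = rock.length := by
    simp only [List.length_map, List.length_reverse, List.length_take, List.length_drop]; omega
  have hidx : ∀ i : Nat, i < rock.length →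
      (y + 1 - (rock.length : Int)).toNat + (rock.length - 1 - i) = y.toNat - i := by
    intro i hi; omega
  have hcell : ∀ a b : String, (!(a == "#" && b == "#")) = true ↔ ¬(a = "#" ∧ b = "#") := by
    intro a b
    simp
    tauto
  rw [hslice, zipAllIff _ [] []]
  unfold AgreeProp
  apply forall_congr'
  intro i
  rw [hwl]
  constructor
  · intro h hi j hj
    by_cases hinr : x.toNat + j < (rock_map.getD (y.toNat - i) []).length
    · -- in range: A checked exactly this pair
      have h' := h (by omega)
      rw [getD_rev_map_window rock_map _ _ _ i hi hlen, hidx i hi,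
        PySem.List.slice_toNat _ hx (by omega),
        show (x + (w : Int)).toNat - x.toNat = w from by omega, zipAllIff _ "" ""] at h'
      have hslen : (((rock_map.getD (y.toNat - i) []).drop x.toNat).take w).length
          = min w ((rock_map.getD (y.toNat - i) []).length - x.toNat) := by
        simp only [List.length_take, List.length_drop]
      have h'' := h' j (by simp only [hslen]; omega)
      rw [getD_take_drop _ x.toNat w j "" (by omega), hcell] at h''
      exact h''
    · -- out of range: the chamber read is "", never "#"
      rw [getD_of_len_le (rock_map.getD (y.toNat - i) []) (x.toNat + j) "" (by omega)]
      rintro ⟨-, hcontra⟩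
      exact absurd hcontra (by decide)
  · intro h hi
    rw [getD_rev_map_window rock_map _ _ _ i (by omega) hlen, hidx i (by omega),
      PySem.List.slice_toNat _ hx (by omega),
      show (x + (w : Int)).toNat - x.toNat = w from by omega, zipAllIff _ "" ""]
    intro j hj
    have hslen : (((rock_map.getD (y.toNat - i) []).drop x.toNat).take w).length
        = min w ((rock_map.getD (y.toNat - i) []).length - x.toNat) := by
      simp only [List.length_take, List.length_drop]
    simp only [hslen] at hj
    rw [getD_take_drop _ x.toNat w j "" (by omega), hcell]
    exact h (by omega) j (by omega)

lemma B_side (rock_map rock : List (List String)) (x y : Int) (w : Nat)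
    (hx : 0 ≤ x) (hh : (rock.length : Int) - 1 ≤ y) :
    (PySem.Set.isdisjoint
      (PySem.Set.ofList ((PySem.List.enumerate rock_map 0).flatMap (fun rrow =>
        (PySem.List.enumerate rrow.2 0).filterMap (fun cch =>
          if cch.2 == "#" then some (cch.1, rrow.1) else none))))
      (PySem.Set.ofList ((PySem.List.enumerate rock 0).flatMap (fun irow =>
        (PySem.List.enumerate (PySem.List.slice irow.2 none (some (w : Int))) 0).filterMap (fun jch =>
          if jch.2 == "#" then some (x + jch.1, y - irow.1) else none)))) = true)
    ↔ AgreeProp rock_map rock x y w := by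
  rw [PySem.Set.isdisjoint_iff]
  -- characterize membership in the two coordinate sets
  have hmemOcc : ∀ p : Int × Int,
      (p ∈ PySem.Set.ofList ((PySem.List.enumerate rock_map 0).flatMap (fun rrow =>
        (PySem.List.enumerate rrow.2 0).filterMap (fun cch =>
          if cch.2 == "#" then some (cch.1, rrow.1) else none)))) ↔
      ∃ r : Nat, r < rock_map.length ∧ ∃ c : Nat, c < (rock_map.getD r []).length ∧
        (rock_map.getD r []).getD c "" = "#" ∧ p = ((c : Int), (r : Int)) := by
    intro p
    rw [PySem.Set.mem_ofList, List.mem_flatMap]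
    constructor
    · rintro ⟨rrow, hrrow, hp⟩
      rw [PySem.List.mem_enumerate_iff] at hrrow
      obtain ⟨r, hr, rfl⟩ := hrrow
      rw [List.mem_filterMap] at hp
      obtain ⟨cch, hcch, hpc⟩ := hp
      rw [PySem.List.mem_enumerate_iff] at hcch
      obtain ⟨c, hc, rfl⟩ := hcch
      simp only [zero_add] at hc hpc
      split_ifs at hpc with hhash
      · refine ⟨r, hr, c, by rw [List.getD_eq_getElem rock_map [] hr]; exact hc, ?_, ?_⟩
        · rw [List.getD_eq_getElem rock_map [] hr, List.getD_eq_getElem rock_map[r] "" hc]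
          exact beq_iff_eq.mp hhash
        · cases hpc; simp
    · rintro ⟨r, hr, c, hc, hhash, rfl⟩
      rw [List.getD_eq_getElem rock_map [] hr] at hc hhash
      rw [List.getD_eq_getElem rock_map[r] "" hc] at hhash
      refine ⟨((r : Int), rock_map[r]), ?_, ?_⟩
      · rw [PySem.List.mem_enumerate_iff]; exact ⟨r, hr, by simp⟩
      · rw [List.mem_filterMap]
        refine ⟨((c : Int), rock_map[r][c]), ?_, ?_⟩
        · rw [PySem.List.mem_enumerate_iff]; exact ⟨c, hc, by simp⟩
        · simp [hhash]
  have hmemCells : ∀ p : Int × Int,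
      (p ∈ PySem.Set.ofList ((PySem.List.enumerate rock 0).flatMap (fun irow =>
        (PySem.List.enumerate (PySem.List.slice irow.2 none (some (w : Int))) 0).filterMap (fun jch =>
          if jch.2 == "#" then some (x + jch.1, y - irow.1) else none)))) ↔
      ∃ i : Nat, i < rock.length ∧ ∃ j : Nat, j < min (rock.getD i []).length w ∧
        (rock.getD i []).getD j "" = "#" ∧ p = (x + (j : Int), y - (i : Int)) := by
    intro p
    rw [PySem.Set.mem_ofList, List.mem_flatMap]
    constructor
    · rintro ⟨irow, hirow, hp⟩
      rw [PySem.List.mem_enumerate_iff] at hirow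
      obtain ⟨i, hi, rfl⟩ := hirow
      rw [List.mem_filterMap] at hp
      obtain ⟨jch, hjch, hpc⟩ := hp
      rw [PySem.List.slice_to_natCast, PySem.List.mem_enumerate_iff] at hjch
      obtain ⟨j, hj, rfl⟩ := hjch
      simp only [zero_add, List.length_take] at hj hpc
      split_ifs at hpc with hhash
      · refine ⟨i, hi, j, by rw [List.getD_eq_getElem rock [] hi]; omega, ?_, ?_⟩
        · rw [List.getD_eq_getElem rock [] hi,
            List.getD_eq_getElem rock[i] "" (show j < rock[i].length by omega)]
          have := beq_iff_eq.mp hhash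
          rwa [List.getElem_take] at this
        · cases hpc; simp
    · rintro ⟨i, hi, j, hj, hhash, rfl⟩
      rw [List.getD_eq_getElem rock [] hi] at hj hhash
      have hj' : j < rock[i].length := by omega
      refine ⟨((i : Int), rock[i]), ?_, ?_⟩
      · rw [PySem.List.mem_enumerate_iff]; exact ⟨i, hi, by simp⟩
      · rw [List.mem_filterMap]
        rw [PySem.List.slice_to_natCast]
        refine ⟨((j : Int), (rock[i].take w)[j]'(by simp only [List.length_take]; omega)), ?_, ?_⟩
        · rw [PySem.List.mem_enumerate_iff]
          exact ⟨j, by simp only [List.length_take]; omega, by simp⟩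
        · rw [List.getD_eq_getElem rock[i] "" hj'] at hhash
          simp [List.getElem_take, hhash]
  unfold AgreeProp
  constructor
  · intro hdisj i hi j hj
    rintro ⟨hrockc, hmapc⟩
    have hinr : x.toNat + j < (rock_map.getD (y.toNat - i) []).length := by
      by_contra hge
      rw [getD_of_len_le _ _ _ (by omega)] at hmapc
      exact absurd hmapc (by decide)
    have hocc : (((x.toNat + j : Nat) : Int), ((y.toNat - i : Nat) : Int)) ∈ _ :=
      (hmemOcc _).mpr ⟨y.toNat - i, by
        by_contra hge
        rw [getD_of_len_le _ _ _ (by omega)] at hinr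
        simp at hinr, x.toNat + j, hinr, hmapc, rfl⟩
    have hcell : (((x.toNat + j : Nat) : Int), ((y.toNat - i : Nat) : Int)) ∈ _ :=
      (hmemCells _).mpr ⟨i, hi, j, hj, hrockc, by
        have h1 : x + (j : Int) = ((x.toNat + j : Nat) : Int) := by omega
        have h2 : y - (i : Int) = ((y.toNat - i : Nat) : Int) := by omega
        rw [h1, h2]⟩
    exact hdisj _ hocc hcell
  · intro hag p hocc hcells
    obtain ⟨r, hr, c, hc, hmapc, rfl⟩ := (hmemOcc p).mp hocc
    obtain ⟨i, hi, j, hj, hrockc, heq⟩ := (hmemCells _).mp hcells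
    have hc' : (c : Int) = x + (j : Int) := congrArg Prod.fst heq
    have hr' : (r : Int) = y - (i : Int) := congrArg Prod.snd heq
    have hcn : c = x.toNat + j := by omega
    have hrn : r = y.toNat - i := by omega
    exact hag i hi j hj ⟨hrockc, by rw [← hcn, ← hrn]; exact hmapc⟩

-- ===== VERDICT (by name: the statement is the Claim_ definition above) =====
theorem rock_can_occupy_spec : Claim_equal_rock_can_occupy := by
  intro rock_map rock rock_coords _hdom hpre
  obtain ⟨hrk, hrm, hcond⟩ := hpre
  obtain ⟨x, y⟩ := rock_coords
  obtain ⟨r0, rtl, rfl⟩ : ∃ r0 rtl, rock = r0 :: rtl := by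
    cases rock with | nil => exact absurd rfl hrk | cons a l => exact ⟨a, l, rfl⟩
  obtain ⟨m0, mtl, rfl⟩ : ∃ m0 mtl, rock_map = m0 :: mtl := by
    cases rock_map with | nil => exact absurd rfl hrm | cons a l => exact ⟨a, l, rfl⟩
  unfold Spec_rock_can_occupy rock_can_occupy rock_can_occupy_alt
  simp only [PySem.List.pyGetD_zero_cons]
  split_ifs with h1 h2 h3
  · rfl
  · rfl
  · rfl
  · -- main branch
    have hyL : y < ((m0 :: mtl).length : Int) :=
      hcond ⟨by omega, by omega, by simp only [List.headD_cons]; omega⟩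
    rw [Bool.eq_iff_iff]
    rw [A_side (m0 :: mtl) (r0 :: rtl) x y r0.length (by omega) (by omega) hyL]
    rw [B_side (m0 :: mtl) (r0 :: rtl) x y r0.length (by omega) (by omega)]
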